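-- pv_equiv track=rewrite | github.com/rodinVasiliy/kmzi_lab2 | main.py | lfsr1
-- ===== SOURCE A (Python) =====
-- def lfsr1(n):
--     flag = 0
--     period = 0
--     cnt = 0
--     start_state = 0b1101001
--     state = 0b11101001
--     lst = list()
--     lst.append(state & 1)
--     while(cnt < n):
--         newbit = ((state >> 7) ^ (state >> 1) ^ state) & 1
--         state = (state >> 1) | (newbit << 6)
--         lst.append(state & 1)
--         cnt += 1
--         if start_state == state and flag == 0:
--             flag = 1
--             period = cnt
--     string = "".join(map(str, lst))
--     return lst, string, period
-- ===== SOURCE B (Python) =====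
-- def lfsr1(n):
--     state = 0b11101001
--     bits = [state & 1]
--     states = []
--     i = 0
--     while i < n:
--         newbit = ((state >> 7) ^ (state >> 1) ^ state) & 1
--         state = (state >> 1) | (newbit << 6)
--         states.append(state)
--         bits.append(state & 1)
--         i += 1
--     try:
--         period = states.index(0b1101001) + 1
--     except ValueError:
--         period = 0
--     string = "".join(map(str, bits))
--     return bits, string, period
-- ===== Notes on version B (the rewrite author's own statement) =====
-- stated objective: alternative
-- what changed: B splits A's single interleaved loop (which checks the period with a flag inside the loop) into a plain generation pass that records every register state, followed by a separate first-index scan (states.index) that yields the period afterwards.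
import Mathlib
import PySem

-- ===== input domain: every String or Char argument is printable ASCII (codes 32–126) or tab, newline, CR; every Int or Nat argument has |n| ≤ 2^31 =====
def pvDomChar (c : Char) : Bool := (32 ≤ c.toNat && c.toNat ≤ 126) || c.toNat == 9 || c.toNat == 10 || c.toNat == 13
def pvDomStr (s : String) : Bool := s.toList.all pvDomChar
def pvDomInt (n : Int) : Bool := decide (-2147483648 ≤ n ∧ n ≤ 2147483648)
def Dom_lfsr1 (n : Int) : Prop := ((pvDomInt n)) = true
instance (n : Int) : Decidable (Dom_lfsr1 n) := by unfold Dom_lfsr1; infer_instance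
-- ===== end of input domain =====

-- B splits A's interleaved loop (flagged period check inside the loop) into a generation pass
-- recording the states plus a separate first-index scan for the period (objective: alternative).

-- the feedback expression both Pythons share verbatim:
-- ((state >> 7) ^ (state >> 1) ^ state) & 1 folded into the next state
def lfsrNext (state : Int) : Int :=
  let newbit := Int.land (Int.xor (Int.xor (Int.shiftRight state 7) (Int.shiftRight state 1)) state) 1
  Int.lor (Int.shiftRight state 1) (Int.shiftLeft newbit 6)

-- ===== PORT A =====
-- the while loop of A, fuel = number of remaining iterations (cnt counts up to n)
def lfsr1LoopA (fuel : Nat) (state cnt flag period : Int) (lst : List Int) : List Int × Int :=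
  match fuel with
  | 0 => (lst, period)
  | f + 1 =>
      let state' := lfsrNext state
      let lst' := lst ++ [Int.land state' 1]
      let cnt' := cnt + 1
      if (105 : Int) = state' ∧ flag = 0 then
        lfsr1LoopA f state' cnt' 1 cnt' lst'
      else
        lfsr1LoopA f state' cnt' flag period lst'

def lfsr1 (n : Int) : List Int × String × Int :=
  let state : Int := 233
  let lst : List Int := [Int.land state 1]
  let r := lfsr1LoopA n.toNat state 0 0 0 lst
  (r.1, String.join (r.1.map PySem.Int.toStr), r.2)

-- ===== PORT B =====
-- generation pass of B: materialize both the bit list and the state list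
def lfsr1Gen (fuel : Nat) (state : Int) (bits states : List Int) : List Int × List Int :=
  match fuel with
  | 0 => (bits, states)
  | f + 1 =>
      let state' := lfsrNext state
      lfsr1Gen f state' (bits ++ [Int.land state' 1]) (states ++ [state'])

def lfsr1_alt (n : Int) : List Int × String × Int :=
  let r := lfsr1Gen n.toNat 233 [Int.land 233 1] []
  let period : Int :=
    match PySem.List.index? r.2 (105 : Int) with
    | some i => (i : Int) + 1
    | none => 0
  (r.1, String.join (r.1.map PySem.Int.toStr), period)

-- ===== PRECONDITION & SPEC =====
def Spec_lfsr1 (n : Int) (out : List Int × String × Int) : Prop := out = lfsr1_alt n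
instance (n : Int) (out : List Int × String × Int) : Decidable (Spec_lfsr1 n out) := by unfold Spec_lfsr1; infer_instance

-- ===== CLAIM (what is proved, stated in full; the proofs are below) =====
def Claim_equal_lfsr1 : Prop := ∀ (n : Int), Dom_lfsr1 n → Spec_lfsr1 n (lfsr1 n)

-- ===== LEMMAS AND PROOFS =====

-- accumulator lemma for B's generation pass
theorem lfsr1Gen_acc (fuel : Nat) (state : Int) (bits states : List Int) :
    lfsr1Gen fuel state bits states =
      (bits ++ (lfsr1Gen fuel state [] []).1, states ++ (lfsr1Gen fuel state [] []).2) := by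
  induction fuel generalizing state bits states with
  | zero => simp [lfsr1Gen]
  | succ f ih =>
      simp only [lfsr1Gen, List.nil_append]
      rw [ih (lfsrNext state) (bits ++ _) (states ++ _), ih (lfsrNext state) [_] [_]]
      simp

-- once A's flag is set, the loop only accumulates bits; period stays fixed
theorem lfsr1LoopA_flag1 (fuel : Nat) (state cnt period : Int) (lst : List Int) :
    lfsr1LoopA fuel state cnt 1 period lst =
      ((lfsr1Gen fuel state lst []).1, period) := by
  induction fuel generalizing state cnt period lst with
  | zero => simp [lfsr1LoopA, lfsr1Gen]
  | succ f ih =>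
      simp only [lfsr1LoopA, lfsr1Gen, List.nil_append]
      rw [if_neg (by simp), ih,
        lfsr1Gen_acc f (lfsrNext state) (lst ++ _) [lfsrNext state],
        lfsr1Gen_acc f (lfsrNext state) (lst ++ _) []]

-- main invariant: with flag = 0 and period = 0, A's loop result is B's generation
-- result with the period read off as 1 + first index of 105 among the new states
theorem lfsr1LoopA_flag0 (fuel : Nat) (state cnt : Int) (lst : List Int) :
    lfsr1LoopA fuel state cnt 0 0 lst =
      ((lfsr1Gen fuel state lst []).1,
        match PySem.List.index? (lfsr1Gen fuel state lst []).2 (105 : Int) with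
        | some i => cnt + 1 + (i : Int)
        | none => 0) := by
  induction fuel generalizing state cnt lst with
  | zero => simp [lfsr1LoopA, lfsr1Gen, PySem.List.index?_eq_idxOf?, List.idxOf?]
  | succ f ih =>
      simp only [lfsr1LoopA, lfsr1Gen, List.nil_append]
      set state' := lfsrNext state with hs'
      rw [lfsr1Gen_acc f state' (lst ++ [Int.land state' 1]) [state']]
      split_ifs with hc
      · obtain ⟨h, -⟩ := hc
        rw [lfsr1LoopA_flag1, lfsr1Gen_acc f state' (lst ++ [Int.land state' 1]) [],
          List.singleton_append, ← h, PySem.List.index?_cons_self]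
        simp
      · have h : state' ≠ (105 : Int) := fun he => hc ⟨he.symm, trivial⟩
        rw [ih, lfsr1Gen_acc f state' (lst ++ [Int.land state' 1]) []]
        rw [List.singleton_append, PySem.List.index?_cons_of_ne _ h]
        cases hidx : PySem.List.index? (lfsr1Gen f state' [] []).2 (105 : Int) with
        | none => rw [PySem.List.index?_eq_idxOf?] at hidx; simp [hidx]
        | some i =>
            rw [PySem.List.index?_eq_idxOf?] at hidx
            simp [hidx]
            ring

-- ===== VERDICT (by name: the statement is the Claim_ definition above) =====
theorem lfsr1_spec : Claim_equal_lfsr1 := by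
  intro n _
  unfold Spec_lfsr1 lfsr1 lfsr1_alt
  dsimp only
  rw [lfsr1LoopA_flag0]
  cases hidx : PySem.List.index? (lfsr1Gen n.toNat 233 [Int.land 233 1] []).2 (105 : Int) with
  | none => rw [PySem.List.index?_eq_idxOf?] at hidx
  | some i => simp; ring
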